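-- pv_equiv track=rewrite | github.com/codewitch-honey-crisis/www_fs | clasp.py | hasCodeBlocks
-- ===== SOURCE A (Python) =====
-- def hasCodeBlocks(input):
--     length = len(input)
--     state = 0
--     i = 0
--     while i<length:
--         ch = input[i]
--         if state == 0:
--             if ch == '<':
--                 state = 1
--         elif state == 1:
--             if ch == '%':
--                 state = 2
--             else:
--                 state = 0
--         elif state == 2:
--             if ch != '@':
--                 return True
--             state = 0
--         i += 1
--     return False
-- ===== SOURCE B (Python) =====
-- def hasCodeBlocks(input):
--     # index-jumping scanner: no state variable; skips 1, 2 or 3 chars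
--     # depending on what the window starting there looks like.
--     n = len(input)
--     i = 0
--     while i < n:
--         if input[i] != '<':
--             i += 1
--         elif i + 2 >= n:
--             break  # too few characters left to complete a match
--         elif input[i + 1] != '%':
--             i += 2
--         elif input[i + 2] != '@':
--             return True
--         else:
--             i += 3
--     return False
-- ===== Notes on version B (the rewrite author's own statement) =====
-- stated objective: simpler
-- what changed: Replaces the 3-state DFA with a stateless index-jumping scanner that inspects the three-character window at each opening angle bracket and advances by 1, 2 or 3 positions accordingly, reproducing A's exact restart behaviour.
import Mathlib
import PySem

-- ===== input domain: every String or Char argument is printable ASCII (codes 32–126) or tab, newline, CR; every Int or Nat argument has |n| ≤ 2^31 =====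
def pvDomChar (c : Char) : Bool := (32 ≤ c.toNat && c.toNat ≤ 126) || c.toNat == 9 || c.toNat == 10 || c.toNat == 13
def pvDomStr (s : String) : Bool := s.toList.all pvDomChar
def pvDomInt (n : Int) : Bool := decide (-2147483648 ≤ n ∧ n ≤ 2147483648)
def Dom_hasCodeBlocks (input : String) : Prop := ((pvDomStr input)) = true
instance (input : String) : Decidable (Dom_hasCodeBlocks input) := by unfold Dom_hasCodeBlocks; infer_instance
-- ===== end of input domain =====

-- ===== PORT A =====
-- B changes: stateless index-jumping scanner instead of A's 3-state DFA (objective: simpler).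
-- A's while loop over input[i] with the state variable, as structural recursion over the chars.
def loopA : List Char → Int → Bool
  | [], _ => false
  | ch :: rest, state =>
    if state = 0 then
      loopA rest (if ch = '<' then 1 else 0)
    else if state = 1 then
      loopA rest (if ch = '%' then 2 else 0)
    else
      if ch ≠ '@' then true else loopA rest 0

def hasCodeBlocks (input : String) : Bool := loopA input.toList 0

-- ===== PORT B =====
-- B's index-jumping scanner: each branch of Source B's while loop is one pattern/branch here
-- (skip 1 on non-'<'; stop when fewer than 3 chars remain at a '<'; skip 2 on '<'+non-'%';
-- return True on '<%'+non-'@'; skip 3 on '<%@').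
def scanB : List Char → Bool
  | [] => false
  | c :: d :: e :: rest =>
    if c ≠ '<' then scanB (d :: e :: rest)
    else if d ≠ '%' then scanB (e :: rest)
    else if e ≠ '@' then true
    else scanB rest
  | c :: rest => if c ≠ '<' then scanB rest else false

def hasCodeBlocks_alt (input : String) : Bool := scanB input.toList

-- ===== PRECONDITION & SPEC =====
def Spec_hasCodeBlocks (input : String) (out : Bool) : Prop := out = hasCodeBlocks_alt input
instance (input : String) (out : Bool) : Decidable (Spec_hasCodeBlocks input out) := by unfold Spec_hasCodeBlocks; infer_instance

-- ===== CLAIM (what is proved, stated in full; the proofs are below) =====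
def Claim_equal_hasCodeBlocks : Prop := ∀ (input : String), Dom_hasCodeBlocks input → Spec_hasCodeBlocks input (hasCodeBlocks input)

-- ===== LEMMAS AND PROOFS =====

-- The DFA started in state 0 agrees with the jumping scanner on every char list.
-- one-step unfoldings of A's loop at each state value
theorem loopA0_cons (ch : Char) (rest : List Char) :
    loopA (ch :: rest) 0 = loopA rest (if ch = '<' then 1 else 0) := by
  rw [loopA]; simp

theorem loopA1_cons (ch : Char) (rest : List Char) :
    loopA (ch :: rest) 1 = loopA rest (if ch = '%' then 2 else 0) := by
  rw [loopA]; simp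

theorem loopA2_cons (ch : Char) (rest : List Char) :
    loopA (ch :: rest) 2 = if ch ≠ '@' then true else loopA rest 0 := by
  rw [loopA]; simp

theorem loopA_eq_scanB : ∀ (n : Nat) (l : List Char), l.length ≤ n → loopA l 0 = scanB l := by
  intro n
  induction n with
  | zero =>
    intro l h
    have : l = [] := List.eq_nil_of_length_eq_zero (Nat.le_zero.mp h)
    simp [this, loopA, scanB]
  | succ n ih =>
    intro l h
    match l with
    | [] => simp [loopA, scanB]
    | [c] => by_cases hc : c = '<' <;> simp [loopA, scanB, hc]
    | [c, d] =>
      by_cases hc : c = '<' <;> by_cases hd : d = '%' <;>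
        simp [loopA, scanB, hc, hd]
    | c :: d :: e :: rest2 =>
      by_cases hc : c = '<'
      · subst hc
        by_cases hd : d = '%'
        · subst hd
          by_cases he : e = '@'
          · subst he
            have hlen : rest2.length ≤ n := by
              simp only [List.length_cons] at h; omega
            have h1 : loopA ('<' :: '%' :: '@' :: rest2) 0 = loopA rest2 0 := by
              rw [loopA0_cons]; simp [loopA1_cons, loopA2_cons]
            rw [h1, ih rest2 hlen]; simp [scanB]
          · have h1 : loopA ('<' :: '%' :: e :: rest2) 0 = true := by
              rw [loopA0_cons]; simp [loopA1_cons, loopA2_cons, he]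
            rw [h1]; simp [scanB, he]
        · have hlen : (e :: rest2).length ≤ n := by
            simp only [List.length_cons] at h ⊢; omega
          have h1 : loopA ('<' :: d :: e :: rest2) 0 = loopA (e :: rest2) 0 := by
            rw [loopA0_cons]; simp [loopA1_cons, hd]
          rw [h1, ih (e :: rest2) hlen]; simp [scanB, hd]
      · have hlen : (d :: e :: rest2).length ≤ n := by
          simp only [List.length_cons] at h ⊢; omega
        have h1 : loopA (c :: d :: e :: rest2) 0 = loopA (d :: e :: rest2) 0 := by
          rw [loopA0_cons]; simp [hc]
        rw [h1, ih (d :: e :: rest2) hlen]; simp [scanB, hc]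

-- ===== VERDICT (by name: the statement is the Claim_ definition above) =====
theorem hasCodeBlocks_spec : Claim_equal_hasCodeBlocks := by
  intro input _
  unfold Spec_hasCodeBlocks hasCodeBlocks hasCodeBlocks_alt
  exact loopA_eq_scanB input.toList.length input.toList le_rfl
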